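-- pv_equiv track=rewrite | github.com/giladondon/ANONA | AnonaAI/Features.py | language_switch
-- ===== SOURCE A (Python) =====
-- ENTER_KEY_CODE = 13
--
-- ALT_KEY_CODE = 18
--
-- SHIFT_KEY_CODE = 16
--
-- def language_switch(od):
--     """
--     :param od: key data of user ending with enter(key code 13).
--     :return:
--     :type od: ordered dictionary
--     """
--     language_shift_ratio = []
--
--     key_count = 0
--     language_shift_count = 0
--     suspect_shift = False, 0
--
--     for item in od:
--         key_count += 1
--
--         if od[item] == ALT_KEY_CODE or od[item] == SHIFT_KEY_CODE:
--             if suspect_shift[0]: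
--                 if suspect_shift[1] != od[item]:
--                     language_shift_count += 1
--                     suspect_shift = False, 0
--             else:
--                 suspect_shift = True, od[item]
--
--         if od[item] == ENTER_KEY_CODE:
--             language_shift_ratio.append([language_shift_count, key_count])
--             key_count = 0
--             language_shift_count = 0
--
--     return language_shift_ratio
-- ===== SOURCE B (Python) =====
-- ENTER_KEY_CODE = 13
-- ALT_KEY_CODE = 18
-- SHIFT_KEY_CODE = 16
--
--
-- def language_switch(od):
--     # Phase 1: extract the value sequence and group it into enter-terminated
--     # segments (keys after the last enter are discarded).
--     values = [od[k] for k in od]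
--     segments = []
--     cur = []
--     for v in values:
--         cur.append(v)
--         if v == ENTER_KEY_CODE:
--             segments.append(cur)
--             cur = []
--     # Phase 2: tally each segment; the suspect-shift state is carried across
--     # segment boundaries (the original never resets it on enter).
--     result = []
--     suspect = (False, 0)
--     for seg in segments:
--         shifts = 0
--         for v in seg:
--             if v == ALT_KEY_CODE or v == SHIFT_KEY_CODE:
--                 if suspect[0]:
--                     if suspect[1] != v:
--                         shifts += 1
--                         suspect = (False, 0)
--                 else:
--                     suspect = (True, v)
--         result.append([shifts, len(seg)])
--     return result
-- ===== Notes on version B (the rewrite author's own statement) =====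
-- stated objective: alternative
-- what changed: Replaces A's single inline state machine (counters reset on enter while iterating) by a two-phase group-then-tally shape: first split the value sequence into enter-terminated segments, then tally each segment's shift count and length, threading the suspect-shift pair across segments.
import Mathlib
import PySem

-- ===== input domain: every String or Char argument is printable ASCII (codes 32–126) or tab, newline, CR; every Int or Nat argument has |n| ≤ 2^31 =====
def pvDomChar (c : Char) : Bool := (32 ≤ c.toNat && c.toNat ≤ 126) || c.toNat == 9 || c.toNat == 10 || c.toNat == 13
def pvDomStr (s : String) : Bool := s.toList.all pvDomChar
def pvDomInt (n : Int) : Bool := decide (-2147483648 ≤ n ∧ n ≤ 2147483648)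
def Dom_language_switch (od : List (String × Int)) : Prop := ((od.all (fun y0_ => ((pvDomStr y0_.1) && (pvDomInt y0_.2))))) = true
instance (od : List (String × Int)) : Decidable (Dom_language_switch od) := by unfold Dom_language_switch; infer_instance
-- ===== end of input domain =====

-- B replaces A's single inline state machine by a two-phase group-then-tally decomposition
-- (split into enter-terminated segments, then tally each segment); same O(n) cost ("alternative").

-- ===== PORT A =====
-- A's loop body, one step of the state machine (state = (ratio, key_count, shift_count, suspect_shift)).
def lsAStep (st : List (List Int) × Int × Int × (Bool × Int)) (v : Int) : List (List Int) × Int × Int × (Bool × Int) :=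
  let ratio := st.1
  let keyCount := st.2.1 + 1
  let shiftCount := st.2.2.1
  let suspect := st.2.2.2
  let p : Int × (Bool × Int) :=
    if v == 18 || v == 16 then
      if suspect.1 then
        if suspect.2 != v then (shiftCount + 1, (false, 0))
        else (shiftCount, suspect)
      else (shiftCount, (true, v))
    else (shiftCount, suspect)
  if v == 13 then (ratio ++ [[p.1, keyCount]], 0, 0, p.2)
  else (ratio, keyCount, p.1, p.2)

def language_switch (od : List (String × Int)) : List (List Int) :=
  -- 'for item in od: … od[item] …' = iterate the keys, each value fetched by dict lookup
  (od.foldl (fun st item => lsAStep st ((PySem.Dict.mk od).getD item.1 0))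
    ([], 0, 0, (false, 0))).1

-- ===== PORT B =====
-- phase 1: group into enter-terminated segments, dropping keys after the last enter
def lsSegments (cur : List Int) : List Int → List (List Int)
  | [] => []
  | v :: vs =>
    if v == 13 then (cur ++ [v]) :: lsSegments [] vs
    else lsSegments (cur ++ [v]) vs

-- phase 2 inner loop: scan one segment, returning (shifts, suspect)
def lsTallySeg (suspect : Bool × Int) (shifts : Int) : List Int → Int × (Bool × Int)
  | [] => (shifts, suspect)
  | v :: vs =>
    if v == 18 || v == 16 then
      if suspect.1 then
        if suspect.2 != v then lsTallySeg (false, 0) (shifts + 1) vs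
        else lsTallySeg suspect shifts vs
      else lsTallySeg (true, v) shifts vs
    else lsTallySeg suspect shifts vs

-- phase 2 outer loop: tally each segment, threading suspect across boundaries
def lsTally (suspect : Bool × Int) : List (List Int) → List (List Int)
  | [] => []
  | seg :: rest =>
    let r := lsTallySeg suspect 0 seg
    [r.1, (seg.length : Int)] :: lsTally r.2 rest

def language_switch_alt (od : List (String × Int)) : List (List Int) :=
  let values := od.map (fun kv => (PySem.Dict.mk od).getD kv.1 0)
  lsTally (false, 0) (lsSegments [] values)

-- ===== PRECONDITION & SPEC =====
def Spec_language_switch (od : List (String × Int)) (out : List (List Int)) : Prop := out = language_switch_alt od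
instance (od : List (String × Int)) (out : List (List Int)) : Decidable (Spec_language_switch od out) := by unfold Spec_language_switch; infer_instance

-- ===== CLAIM (what is proved, stated in full; the proofs are below) =====
def Claim_equal_language_switch : Prop := ∀ (od : List (String × Int)), Dom_language_switch od → Spec_language_switch od (language_switch od)

-- ===== LEMMAS AND PROOFS =====

-- proof-side: the shared alt/shift step (shift_count, suspect) → (shift_count', suspect')
def lsStep (sus : Bool × Int) (sc : Int) (v : Int) : Int × (Bool × Int) :=
  if v == 18 || v == 16 then
    if sus.1 then
      if sus.2 != v then (sc + 1, (false, 0))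
      else (sc, sus)
    else (sc, (true, v))
  else (sc, sus)

theorem lsAStep_eq (st : List (List Int) × Int × Int × (Bool × Int)) (v : Int) :
    lsAStep st v =
      if v == 13 then
        (st.1 ++ [[(lsStep st.2.2.2 st.2.2.1 v).1, st.2.1 + 1]], 0, 0, (lsStep st.2.2.2 st.2.2.1 v).2)
      else (st.1, st.2.1 + 1, lsStep st.2.2.2 st.2.2.1 v) := by
  simp only [lsAStep, lsStep]

theorem lsTallySeg_cons (sus : Bool × Int) (sc : Int) (v : Int) (vs : List Int) :
    lsTallySeg sus sc (v :: vs) = lsTallySeg (lsStep sus sc v).2 (lsStep sus sc v).1 vs := by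
  simp only [lsTallySeg, lsStep]
  split_ifs <;> rfl

theorem lsTallySeg_append (xs ys : List Int) (sus : Bool × Int) (sc : Int) :
    lsTallySeg sus sc (xs ++ ys)
      = lsTallySeg (lsTallySeg sus sc xs).2 (lsTallySeg sus sc xs).1 ys := by
  induction xs generalizing sus sc with
  | nil => rfl
  | cons x xs ih =>
    rw [List.cons_append, lsTallySeg_cons, lsTallySeg_cons, ih]

-- proof-side: A's machine restarted mid-segment (cur = keys already seen in this segment)
def lsTallyCont (sus : Bool × Int) (sc : Int) (cur : List Int) : List Int → List (List Int)
  | [] => []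
  | v :: vs =>
    if v == 13 then
      [(lsStep sus sc v).1, (cur.length : Int) + 1] :: lsTallyCont (lsStep sus sc v).2 0 [] vs
    else lsTallyCont (lsStep sus sc v).2 (lsStep sus sc v).1 (cur ++ [v]) vs

theorem foldl_lsAStep (vs : List Int) :
    ∀ (ratio : List (List Int)) (cur : List Int) (sc : Int) (sus : Bool × Int),
    (vs.foldl lsAStep (ratio, (cur.length : Int), sc, sus)).1
      = ratio ++ lsTallyCont sus sc cur vs := by
  induction vs with
  | nil => intro ratio cur sc sus; simp [lsTallyCont]
  | cons v vs ih =>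
    intro ratio cur sc sus
    rw [List.foldl_cons, lsAStep_eq]
    simp only [lsTallyCont]
    by_cases h13 : (v == 13) = true
    · simp only [h13, if_true]
      rw [show ((0 : Int) = (([] : List Int).length : Int)) by simp]
      rw [ih]
      simp [List.append_assoc]
    · simp only [h13, if_false, Bool.false_eq_true]
      have : ((cur.length : Int) + 1) = (((cur ++ [v]).length : Int)) := by simp
      rw [this, ih]

theorem lsTallyCont_eq_lsTally (vs : List Int) :
    ∀ (cur : List Int) (sus0 : Bool × Int),
    lsTallyCont (lsTallySeg sus0 0 cur).2 (lsTallySeg sus0 0 cur).1 cur vs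
      = lsTally sus0 (lsSegments cur vs) := by
  induction vs with
  | nil => intro cur sus0; rfl
  | cons v vs ih =>
    intro cur sus0
    simp only [lsTallyCont, lsSegments]
    by_cases h13 : (v == 13) = true
    · have hv : v = 13 := by simpa using h13
      subst hv
      simp only [h13, if_true, lsTally]
      have hstep : lsStep (lsTallySeg sus0 0 cur).2 (lsTallySeg sus0 0 cur).1 13
          = ((lsTallySeg sus0 0 cur).1, (lsTallySeg sus0 0 cur).2) := by
        simp [lsStep]
      have hseg : lsTallySeg sus0 0 (cur ++ [13])
          = ((lsTallySeg sus0 0 cur).1, (lsTallySeg sus0 0 cur).2) := by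
        rw [lsTallySeg_append]
        rw [show lsTallySeg (lsTallySeg sus0 0 cur).2 (lsTallySeg sus0 0 cur).1 [13]
            = ((lsTallySeg sus0 0 cur).1, (lsTallySeg sus0 0 cur).2) from by
          simp [lsTallySeg]]
      rw [hstep]
      have ihuse := ih [] (lsTallySeg sus0 0 cur).2
      simp only [show lsTallySeg (lsTallySeg sus0 0 cur).2 0 [] = (0, (lsTallySeg sus0 0 cur).2) from rfl] at ihuse
      rw [ihuse, hseg]
      simp
    · simp only [h13, if_false, Bool.false_eq_true]
      have hseg : lsTallySeg sus0 0 (cur ++ [v])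
          = lsStep (lsTallySeg sus0 0 cur).2 (lsTallySeg sus0 0 cur).1 v := by
        rw [lsTallySeg_append, lsTallySeg_cons]
        rfl
      rw [show lsStep (lsTallySeg sus0 0 cur).2 (lsTallySeg sus0 0 cur).1 v
          = lsTallySeg sus0 0 (cur ++ [v]) from hseg.symm]
      exact ih (cur ++ [v]) sus0

-- ===== VERDICT (by name: the statement is the Claim_ definition above) =====
theorem language_switch_spec : Claim_equal_language_switch := by
  intro od _
  show language_switch od = language_switch_alt od
  simp only [language_switch, language_switch_alt]
  rw [← List.foldl_map]
  rw [show (([], 0, 0, (false, 0)) : List (List Int) × Int × Int × (Bool × Int))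
      = ([], ((([] : List Int).length : Int)), 0, (false, 0)) from by simp]
  rw [foldl_lsAStep]
  have := lsTallyCont_eq_lsTally (od.map (fun kv => (PySem.Dict.mk od).getD kv.1 0)) [] (false, 0)
  simp only [show lsTallySeg (false, 0) 0 [] = (0, (false, 0)) from rfl] at this
  rw [List.nil_append, this]
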